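-- pv_equiv track=rewrite | github.com/leehj24/Coding_Test | programmers/Level.2_py/귤고르기.py | coke
-- ===== SOURCE A (Python) =====
-- def coke(k,box):
--     answer = 0
--     a={}
--
--     for i in box:
--         if i in a:  # a안에 i가 있으면
--             a[i]+=1 # a[i]값을 1씩 증가 (ex: 1:1, 3:1 이였디면 1:1, 3:2)
--         else:
--             a[i]=1  #a[i]값을 1로 저장
--
--     # dict된 a를 item으로 묶은후, a[i] 값만 불러와 내림순으로 배열한 값을 dict
--     #a.items()는 dict_items([(1, 1), (3, 2), (2, 2), (5, 2), (4, 1)])이다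
--
--     a= dict(sorted(a.items(),key = lambda x:x[1],reverse=True))
--
--     for i in a:
--         if k <=0:
--             return answer
--         k-=a[i]     #귤 k개수에서 a[i]값 만큼 뺀다
--         answer +=1
--     return answer
-- ===== SOURCE B (Python) =====
-- def coke(k, box):
--     # Counting-sort buckets of frequencies instead of sorting the counts.
--     cnt = {}
--     for i in box:
--         cnt[i] = cnt.get(i, 0) + 1
--     buckets = {}
--     for c in cnt.values():
--         buckets[c] = buckets.get(c, 0) + 1
--     answer = 0
--     f = len(box)
--     while f > 0:
--         for _ in range(buckets.get(f, 0)):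
--             if k <= 0:
--                 return answer
--             k -= f
--             answer += 1
--         f -= 1
--     return answer
-- ===== Notes on version B (the rewrite author's own statement) =====
-- stated objective: alternative
-- what changed: Replaces A's sort of the frequency counts by a counting-sort over buckets of counts (frequency-of-frequency dict, then a greedy sweep from the largest possible count down), removing the sort at the cost of a bucket sweep.
import Mathlib
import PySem

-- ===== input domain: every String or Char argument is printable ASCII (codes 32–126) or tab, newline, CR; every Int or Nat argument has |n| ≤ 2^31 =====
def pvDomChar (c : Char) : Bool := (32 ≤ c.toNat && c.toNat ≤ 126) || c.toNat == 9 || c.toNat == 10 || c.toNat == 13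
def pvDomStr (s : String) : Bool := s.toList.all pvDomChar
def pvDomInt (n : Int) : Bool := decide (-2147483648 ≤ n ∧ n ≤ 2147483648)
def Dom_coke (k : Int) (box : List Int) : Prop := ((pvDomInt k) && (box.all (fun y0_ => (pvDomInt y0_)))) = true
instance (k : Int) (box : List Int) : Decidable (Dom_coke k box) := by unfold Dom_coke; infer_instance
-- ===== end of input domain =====

-- B replaces A's sort of the frequency counts by a counting-sort bucket sweep (no sort; alternative algorithm).

-- ===== PORT A =====
-- first loop of A: if i in a: a[i] += 1 else: a[i] = 1
def cokeCount (box : List Int) : PySem.Dict Int Int :=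
  box.foldl (fun a i => if a.contains i then a.insert i (a.getD i 0 + 1) else a.insert i 1) PySem.Dict.empty

-- second loop of A: for i in a: if k <= 0: return answer; k -= a[i]; answer += 1
-- (a[i] ported as (get? i).getD 0; every iterated key is present, so the default is never used)
def cokeLoopA (a : PySem.Dict Int Int) : List Int → Int → Int → Int
  | [], _, answer => answer
  | i :: rest, k, answer =>
      if k ≤ 0 then answer
      else cokeLoopA a rest (k - (a.get? i).getD 0) (answer + 1)

def coke (k : Int) (box : List Int) : Int :=
  let a := cokeCount box
  let a2 := PySem.Dict.ofList (PySem.List.sorted a.items (fun x => x.2) true)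
  cokeLoopA a2 a2.keys k 0

-- ===== PORT B =====
-- inner 'for _ in range(buckets.get(f, 0))' with the early return signalled as .inl
def cokeAltInner (f : Int) : Nat → Int → Int → (Int ⊕ (Int × Int))
  | 0, k, answer => .inr (k, answer)
  | t+1, k, answer => if k ≤ 0 then .inl answer else cokeAltInner f t (k - f) (answer + 1)

-- outer 'while f > 0: … f -= 1' as a countdown on f
def cokeAltLoop (buckets : PySem.Dict Int Int) : Nat → Int → Int → Int
  | 0, _, answer => answer
  | f+1, k, answer =>
      match cokeAltInner ((f : Int) + 1) ((buckets.getD ((f : Int) + 1) 0).toNat) k answer with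
      | .inl r => r
      | .inr (k', answer') => cokeAltLoop buckets f k' answer'

def coke_alt (k : Int) (box : List Int) : Int :=
  let cnt := box.foldl (fun d i => d.insert i (d.getD i 0 + 1)) PySem.Dict.empty
  let buckets := cnt.values.foldl (fun d c => d.insert c (d.getD c 0 + 1)) PySem.Dict.empty
  cokeAltLoop buckets box.length k 0

-- ===== PRECONDITION & SPEC =====
def Spec_coke (k : Int) (box : List Int) (out : Int) : Prop := out = coke_alt k box
instance (k : Int) (box : List Int) (out : Int) : Decidable (Spec_coke k box out) := by unfold Spec_coke; infer_instance

-- ===== CLAIM (what is proved, stated in full; the proofs are below) =====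
def Claim_equal_coke : Prop := ∀ (k : Int) (box : List Int), Dom_coke k box → Spec_coke k box (coke k box)

-- ===== LEMMAS AND PROOFS =====

-- the common greedy core: take counts in the given order until k is exhausted
def pvGreedy : List Int → Int → Int → Int
  | [], _, ans => ans
  | c :: rest, k, ans => if k ≤ 0 then ans else pvGreedy rest (k - c) (ans + 1)

-- the sequence of counts B's bucket sweep consumes, for f = n down to 1
def pvBlocks (vs : List Int) : Nat → List Int
  | 0 => []
  | n+1 => List.replicate (vs.count ((n : Int) + 1)) ((n : Int) + 1) ++ pvBlocks vs n

lemma cokeCount_eq_counter (box : List Int) : cokeCount box = PySem.Dict.counter box := by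
  have hf : (fun (a : PySem.Dict Int Int) (i : Int) =>
      if a.contains i then a.insert i (a.getD i 0 + 1) else a.insert i 1) =
      (fun (a : PySem.Dict Int Int) (i : Int) => a.insert i (a.getD i 0 + 1)) := by
    funext a i
    by_cases h : a.contains i = true
    · simp [h]
    · have h0 : a.getD i 0 = 0 := PySem.Dict.getD_of_not_contains a 0 (by simp [h])
      simp [h, h0]
  unfold cokeCount
  rw [hf, PySem.Dict.foldl_insert_getD_add_one_eq_counter]

lemma cokeLoopA_eq_greedy (a : PySem.Dict Int Int) (ks : List Int) (k ans : Int) :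
    cokeLoopA a ks k ans = pvGreedy (ks.map (fun i => (a.get? i).getD 0)) k ans := by
  induction ks generalizing k ans with
  | nil => rfl
  | cons i rest ih => simp only [cokeLoopA, List.map, pvGreedy]; split_ifs <;> simp [ih]

lemma cokeAltInner_greedy (f : Int) (t : Nat) (k ans : Int) (ys : List Int) :
    (match cokeAltInner f t k ans with
     | .inl r => r
     | .inr (k', ans') => pvGreedy ys k' ans') = pvGreedy (List.replicate t f ++ ys) k ans := by
  induction t generalizing k ans with
  | zero => rfl
  | succ t ih =>
      simp only [cokeAltInner, List.replicate_succ, List.cons_append, pvGreedy]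
      split_ifs <;> simp [ih]

lemma cokeAltLoop_eq_greedy (vs : List Int) (n : Nat) (k ans : Int) :
    cokeAltLoop (PySem.Dict.counter vs) n k ans = pvGreedy (pvBlocks vs n) k ans := by
  induction n generalizing k ans with
  | zero => rfl
  | succ n ih =>
      have ht : ((PySem.Dict.counter vs).getD ((n : Int) + 1) 0).toNat
          = vs.count ((n : Int) + 1) := by
        rw [PySem.Dict.getD_counter]; exact Int.toNat_natCast _
      show (match cokeAltInner ((n : Int) + 1) (((PySem.Dict.counter vs).getD ((n : Int) + 1) 0).toNat) k ans with
            | .inl r => r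
            | .inr (k', ans') => cokeAltLoop (PySem.Dict.counter vs) n k' ans') = _
      rw [ht, show pvBlocks vs (n+1)
            = List.replicate (vs.count ((n : Int) + 1)) ((n : Int) + 1) ++ pvBlocks vs n from rfl,
          ← cokeAltInner_greedy]
      cases cokeAltInner ((n : Int) + 1) (vs.count ((n : Int) + 1)) k ans with
      | inl r => rfl
      | inr p => exact ih p.1 p.2

lemma pvBlocks_count (vs : List Int) (n : Nat) (v : Int) :
    (pvBlocks vs n).count v = if 1 ≤ v ∧ v ≤ (n : Int) then vs.count v else 0 := by
  induction n with
  | zero => simp [pvBlocks]; intro h1 h2; omega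
  | succ n ih =>
      simp only [pvBlocks, List.count_append, ih, List.count_replicate]
      by_cases hv : v = (n : Int) + 1
      · subst hv
        rw [if_pos (by simp), if_neg (by omega), if_pos (by push_cast; omega)]
        omega
      · rw [if_neg (by simp only [beq_iff_eq]; exact fun h => hv h.symm)]
        by_cases h1 : 1 ≤ v ∧ v ≤ (n : Int)
        · rw [if_pos h1, if_pos (by push_cast; omega)]; omega
        · rw [if_neg h1, if_neg (by push_cast; omega)]

lemma pvBlocks_mem (vs : List Int) (n : Nat) (x : Int) (hx : x ∈ pvBlocks vs n) :
    1 ≤ x ∧ x ≤ (n : Int) := by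
  induction n with
  | zero => simp [pvBlocks] at hx
  | succ n ih =>
      simp only [pvBlocks, List.mem_append, List.mem_replicate] at hx
      rcases hx with ⟨-, rfl⟩ | hx
      · push_cast; omega
      · have := ih hx; push_cast; omega

lemma pvBlocks_perm (vs : List Int) (n : Nat) (h : ∀ w ∈ vs, 1 ≤ w ∧ w ≤ (n : Int)) :
    (pvBlocks vs n).Perm vs := by
  rw [List.perm_iff_count]
  intro v
  rw [pvBlocks_count]
  by_cases hv : 1 ≤ v ∧ v ≤ (n : Int)
  · rw [if_pos hv]
  · rw [if_neg hv]
    rcases List.count_eq_zero.mpr (fun hmem => hv (h v hmem)) with h0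
    omega

lemma pvBlocks_pairwise (vs : List Int) (n : Nat) :
    (pvBlocks vs n).Pairwise (fun a b => b ≤ a) := by
  induction n with
  | zero => simp [pvBlocks]
  | succ n ih =>
      simp only [pvBlocks]
      rw [List.pairwise_append]
      refine ⟨List.pairwise_replicate.mpr (by simp), ih, ?_⟩
      intro a ha b hb
      rcases List.mem_replicate.mp ha with ⟨-, rfl⟩
      have := pvBlocks_mem vs n b hb
      omega

lemma counter_values_bounds (box : List Int) (w : Int) (hw : w ∈ (PySem.Dict.counter box).values) :
    1 ≤ w ∧ w ≤ (box.length : Int) := by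
  have : (PySem.Dict.counter box).values = (PySem.Set.ofList box).map (fun k => ((List.count k box : Int))) := by
    show ((PySem.Dict.counter box).items).map Prod.snd = _
    rw [PySem.Dict.items_counter]
    simp [List.map_map, Function.comp]
  rw [this] at hw
  rcases List.mem_map.mp hw with ⟨x, hx, rfl⟩
  have hxm : x ∈ box := (PySem.Set.mem_ofList box x).mp hx
  constructor
  · exact_mod_cast List.count_pos_iff.mpr hxm
  · exact_mod_cast List.count_le_length

-- A's sorted value sequence equals B's bucket sequence
lemma sorted_values_eq_blocks (box : List Int) :
    (PySem.List.sorted (PySem.Dict.counter box).items (fun x => x.2) true).map (fun p => p.2)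
      = pvBlocks (PySem.Dict.counter box).values box.length := by
  set a := PySem.Dict.counter box with ha
  set L := PySem.List.sorted a.items (fun x => x.2) true with hL
  have hpermL : (L.map (fun p => p.2)).Perm a.values :=
    (PySem.List.sorted_perm a.items (fun x => x.2) true).map _
  have hpermB : (pvBlocks a.values box.length).Perm a.values :=
    pvBlocks_perm _ _ (fun w hw => counter_values_bounds box w hw)
  refine List.Perm.eq_of_pairwise (le := fun x y => y ≤ x)
    (fun x y _ _ h1 h2 => le_antisymm h2 h1) ?_ (pvBlocks_pairwise _ _)
    (hpermL.trans hpermB.symm)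
  exact List.pairwise_map.mpr (PySem.List.sorted_pairwise_rev a.items (fun x => x.2))

-- A reduces to the greedy over its sorted value sequence
lemma coke_eq_greedy (k : Int) (box : List Int) :
    coke k box = pvGreedy ((PySem.List.sorted (PySem.Dict.counter box).items
      (fun x => x.2) true).map (fun p => p.2)) k 0 := by
  unfold coke
  rw [cokeCount_eq_counter]
  set a := PySem.Dict.counter box with ha
  set L := PySem.List.sorted a.items (fun x => x.2) true with hL
  have hnodup : (L.map Prod.fst).Nodup := by
    have : (L.map Prod.fst).Perm (a.items.map Prod.fst) :=
      (PySem.List.sorted_perm a.items (fun x => x.2) true).map _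
    exact this.nodup_iff.mpr (PySem.Dict.nodup_keys_counter box)
  have hitems : (PySem.Dict.ofList L).items = L := by
    have := PySem.Dict.items_foldl_insert_fresh L Prod.fst Prod.snd PySem.Dict.empty
      (fun p _ => by simp [PySem.Dict.contains_empty]) hnodup
    simpa using this
  have hkeys : (PySem.Dict.ofList L).keys = L.map Prod.fst := by
    show ((PySem.Dict.ofList L).items).map Prod.fst = _
    rw [hitems]
  have hvals : (PySem.Dict.ofList L).values = L.map Prod.snd := by
    show ((PySem.Dict.ofList L).items).map Prod.snd = _
    rw [hitems]
  rw [cokeLoopA_eq_greedy]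
  congr 1
  have hnk : (PySem.Dict.ofList L).keys.Nodup := by rw [hkeys]; exact hnodup
  calc (PySem.Dict.ofList L).keys.map (fun i => ((PySem.Dict.ofList L).get? i).getD 0)
      = (PySem.Dict.ofList L).keys.map (fun i => (PySem.Dict.ofList L).getD i 0) := by
        simp [PySem.Dict.getD_eq_get?_getD]
    _ = (PySem.Dict.ofList L).values := (PySem.Dict.values_eq_map_keys _ hnk 0).symm
    _ = L.map (fun p => p.2) := hvals

-- B reduces to the greedy over the bucket sequence
lemma coke_alt_eq_greedy (k : Int) (box : List Int) :
    coke_alt k box = pvGreedy (pvBlocks (PySem.Dict.counter box).values box.length) k 0 := by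
  unfold coke_alt
  rw [PySem.Dict.foldl_insert_getD_add_one_eq_counter]
  show cokeAltLoop (List.foldl (fun d c => d.insert c (d.getD c 0 + 1)) PySem.Dict.empty
    (PySem.Dict.counter box).values) box.length k 0 = _
  rw [PySem.Dict.foldl_insert_getD_add_one_eq_counter, cokeAltLoop_eq_greedy]

-- ===== VERDICT (by name: the statement is the Claim_ definition above) =====
theorem coke_spec : Claim_equal_coke := by
  intro k box _
  show coke k box = coke_alt k box
  rw [coke_eq_greedy, coke_alt_eq_greedy, sorted_values_eq_blocks]
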